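-- pv_equiv track=rewrite | github.com/TechTiqs-Kavya-Shah/TecTiqs | InnovAIte Hackathon/CODE/main(1).py | create_timetable
-- ===== SOURCE A (Python) =====
-- def create_timetable(subjects_per_day, study_time_per_day, start_time):
--   timetable = {}
--   for day, subjects in subjects_per_day.items():
--     if subjects:  # Check if subjects list is not empty
--       timetable[day] = []
--       current_time = start_time
--       for subject in subjects:
--         # Check if subject has a study time
--         if day in study_time_per_day and subject in study_time_per_day[day]:
--           study_time = study_time_per_day[day][subject]
--           timetable[day].append((current_time, subject))
--           current_time = add_time(current_time, study_time)
--       timetable[day].append(('End', current_time))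
--   return timetable
--
-- def add_time(current_time, study_time):
--   hours, minutes = map(int, current_time.split(':'))
--   study_hours, study_minutes = map(int, study_time.split(':'))
--   new_hours = hours + study_hours
--   new_minutes = minutes + study_minutes
--   if new_minutes >= 60:
--     new_hours += 1
--     new_minutes -= 60
--   return f"{new_hours:02d}:{new_minutes:02d}"
-- ===== SOURCE B (Python) =====
-- def create_timetable(subjects_per_day, study_time_per_day, start_time):
--     def schedule(subjects, current_time, slots):
--         if not subjects:
--             return [('End', current_time)]
--         first, rest = subjects[0], subjects[1:]
--         if first in slots:
--             return [(current_time, first)] + schedule(rest, add_time(current_time, slots[first]), slots)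
--         return schedule(rest, current_time, slots)
--     return {day: schedule(subjects, start_time, study_time_per_day.get(day, {}))
--             for day, subjects in subjects_per_day.items() if subjects}
--
-- def add_time(current_time, study_time):
--     hours, minutes = map(int, current_time.split(':'))
--     study_hours, study_minutes = map(int, study_time.split(':'))
--     new_hours = hours + study_hours
--     new_minutes = minutes + study_minutes
--     if new_minutes >= 60:
--         new_hours += 1
--         new_minutes -= 60
--     return f"{new_hours:02d}:{new_minutes:02d}"
-- ===== Notes on version B (the rewrite author's own statement) =====
-- stated objective: alternative
-- what changed: A builds the timetable imperatively with nested loops, dict mutation and a current_time accumulator; B replaces this with structural recursion: a recursive schedule() that consumes the subject list and returns each day's slot list directly (appending ('End', t) at the base case), wrapped in a dict comprehension over the non-empty days.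
import Mathlib
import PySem

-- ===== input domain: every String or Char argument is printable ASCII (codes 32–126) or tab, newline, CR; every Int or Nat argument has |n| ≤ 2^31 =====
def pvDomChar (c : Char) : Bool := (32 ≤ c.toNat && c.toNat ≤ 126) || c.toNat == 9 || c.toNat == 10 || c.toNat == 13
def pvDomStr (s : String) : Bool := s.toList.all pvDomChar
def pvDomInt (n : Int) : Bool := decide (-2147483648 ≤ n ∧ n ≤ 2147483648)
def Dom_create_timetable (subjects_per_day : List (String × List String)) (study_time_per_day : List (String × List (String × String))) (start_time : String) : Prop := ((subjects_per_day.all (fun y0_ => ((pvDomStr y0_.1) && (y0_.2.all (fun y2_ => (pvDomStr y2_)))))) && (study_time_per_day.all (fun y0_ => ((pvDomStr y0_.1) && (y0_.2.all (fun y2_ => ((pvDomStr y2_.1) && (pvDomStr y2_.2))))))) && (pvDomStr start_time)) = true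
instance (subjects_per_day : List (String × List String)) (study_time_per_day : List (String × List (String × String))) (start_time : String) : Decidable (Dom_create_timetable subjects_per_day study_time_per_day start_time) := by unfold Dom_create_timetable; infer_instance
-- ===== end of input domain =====

-- B replaces A's imperative nested loops and current_time accumulator by structural recursion on the
-- subject list (a recursive schedule helper) under a dict comprehension; objective: alternative.

-- ===== PORT A =====
-- shared helper: Python's add_time, called by both A and B on identical arguments.
-- none = ValueError of int()/unpacking (raises in Python); the "" fallback is unreachable under Pre_.
def pvParseTime? (s : String) : Option (Int × Int) :=
  match (PySem.Str.split? s ":").getD [] with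
  | [h, m] =>
    match PySem.Int.ofStr? h, PySem.Int.ofStr? m with
    | some a, some b => some (a, b)
    | _, _ => none
  | _ => none

-- f"{n:02d}" for an Int n: pad a single digit with '0'; exact on all Int (sign counts toward width)
def pvFmt02 (n : Int) : String :=
  let s := PySem.Int.toStr n
  if s.toList.length = 1 then String.ofList ('0' :: s.toList) else s

def pvAddTime (current_time study_time : String) : String :=
  match pvParseTime? current_time, pvParseTime? study_time with
  | some (hours, minutes), some (study_hours, study_minutes) =>
    let new_hours := hours + study_hours
    let new_minutes := minutes + study_minutes
    let p := if new_minutes ≥ 60 then (new_hours + 1, new_minutes - 60) else (new_hours, new_minutes)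
    pvFmt02 p.1 ++ ":" ++ pvFmt02 p.2
  | _, _ => ""  -- ValueError in Python; excluded by Pre_

def create_timetable (subjects_per_day : List (String × List String)) (study_time_per_day : List (String × List (String × String))) (start_time : String) : List (String × List (String × String)) :=
  (subjects_per_day.foldl (fun (timetable : PySem.Dict String (List (String × String))) p =>
    let day := p.1
    let subjects := p.2
    if subjects.isEmpty then timetable
    else
      -- inner loop: state (timetable[day] so far, current_time)
      let fin := subjects.foldl (fun (st : List (String × String) × String) subject =>
        match PySem.Dict.get? (PySem.Dict.mk study_time_per_day) day with
        | some inner =>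
          match PySem.Dict.get? (PySem.Dict.mk inner) subject with
          | some study_time => (st.1 ++ [(st.2, subject)], pvAddTime st.2 study_time)
          | none => st
        | none => st) ([], start_time)
      timetable.insert day (fin.1 ++ [("End", fin.2)])) PySem.Dict.empty).items

-- ===== PORT B =====
-- B's recursive schedule(subjects, current_time, slots)
def pvScheduleB (slots : PySem.Dict String String) : List String → String → List (String × String)
  | [], current_time => [("End", current_time)]
  | first :: rest, current_time =>
    match slots.get? first with
    | some t => [(current_time, first)] ++ pvScheduleB slots rest (pvAddTime current_time t)
    | none => pvScheduleB slots rest current_time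

-- B's dict comprehension over the non-empty days (a Python dict built in iteration order)
def create_timetable_alt (subjects_per_day : List (String × List String)) (study_time_per_day : List (String × List (String × String))) (start_time : String) : List (String × List (String × String)) :=
  (subjects_per_day.foldl (fun (d : PySem.Dict String (List (String × String))) p =>
    if p.2.isEmpty then d
    else d.insert p.1
      (pvScheduleB (PySem.Dict.mk ((PySem.Dict.get? (PySem.Dict.mk study_time_per_day) p.1).getD []))
        p.2 start_time)) PySem.Dict.empty).items

-- ===== PRECONDITION & SPEC =====
-- closed-form "H:M is int-parseable" check (independent of the ports)
def pvIsTime (s : String) : Bool :=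
  match (PySem.Str.split? s ":").getD [] with
  | [h, m] => (PySem.Int.ofStr? h).isSome && (PySem.Int.ofStr? m).isSome
  | _ => false

-- the study-time strings A actually passes to add_time: for each day with a non-empty subject list,
-- the times of its subjects that have an entry in study_time_per_day[day] (first-match lookups)
def pvMatchedTimes (subjects_per_day : List (String × List String)) (study_time_per_day : List (String × List (String × String))) : List String :=
  subjects_per_day.flatMap (fun p =>
    if p.2.isEmpty then []
    else
      match List.find? (fun q => q.1 == p.1) study_time_per_day with
      | some q => p.2.filterMap (fun s => (List.find? (fun r => r.1 == s) q.2).map (·.2))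
      | none => [])

-- Pre_ excludes (a) inputs where add_time raises ValueError: any matched study time that is not
-- "int:int", or a non-"int:int" start_time when at least one subject is matched; and (b) association
-- lists with duplicate dict keys, which no Python dict argument can represent.
def Pre_create_timetable (subjects_per_day : List (String × List String)) (study_time_per_day : List (String × List (String × String))) (start_time : String) : Prop :=
  (pvMatchedTimes subjects_per_day study_time_per_day = [] ∨ pvIsTime start_time = true) ∧
  (∀ t ∈ pvMatchedTimes subjects_per_day study_time_per_day, pvIsTime t = true) ∧
  (subjects_per_day.map Prod.fst).Nodup ∧
  (study_time_per_day.map Prod.fst).Nodup ∧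
  (∀ q ∈ study_time_per_day, (q.2.map Prod.fst).Nodup)

instance (subjects_per_day : List (String × List String)) (study_time_per_day : List (String × List (String × String))) (start_time : String) : Decidable (Pre_create_timetable subjects_per_day study_time_per_day start_time) := by unfold Pre_create_timetable; infer_instance

def pvWitness_create_timetable : (List (String × List String)) × (List (String × List (String × String))) × String :=
  ([("Mon", ["math", "cs"]), ("Tue", [])], [("Mon", [("math", "1:30"), ("cs", "2:45")])], "9:00")

def Spec_create_timetable (subjects_per_day : List (String × List String)) (study_time_per_day : List (String × List (String × String))) (start_time : String) (out : List (String × List (String × String))) : Prop := out = create_timetable_alt subjects_per_day study_time_per_day start_time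
instance (subjects_per_day : List (String × List String)) (study_time_per_day : List (String × List (String × String))) (start_time : String) (out : List (String × List (String × String))) : Decidable (Spec_create_timetable subjects_per_day study_time_per_day start_time out) := by unfold Spec_create_timetable; infer_instance

-- ===== CLAIM (what is proved, stated in full; the proofs are below) =====
def Claim_equal_create_timetable : Prop := ∀ (subjects_per_day : List (String × List String)) (study_time_per_day : List (String × List (String × String))) (start_time : String), Dom_create_timetable subjects_per_day study_time_per_day start_time → Pre_create_timetable subjects_per_day study_time_per_day start_time → Spec_create_timetable subjects_per_day study_time_per_day start_time (create_timetable subjects_per_day study_time_per_day start_time)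

-- ===== LEMMAS AND PROOFS =====

-- A's inner fold equals pvScheduleB
theorem pvAside (inner : PySem.Dict String String) (subjects : List String) (acc : List (String × String)) (cur : String) :
    (let fin := subjects.foldl (fun (st : List (String × String) × String) subject =>
        match inner.get? subject with
        | some study_time => (st.1 ++ [(st.2, subject)], pvAddTime st.2 study_time)
        | none => st) (acc, cur)
     fin.1 ++ [("End", fin.2)]) = acc ++ pvScheduleB inner subjects cur := by
  induction subjects generalizing acc cur with
  | nil => simp [pvScheduleB]
  | cons s rest ih =>
    simp only [List.foldl_cons, pvScheduleB]
    cases h : inner.get? s with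
    | none => simpa [h] using ih acc cur
    | some t => simpa [h] using ih (acc ++ [(cur, s)]) (pvAddTime cur t)

-- with no slots at all, B's recursion returns just the End row
theorem pvScheduleB_empty (subjects : List String) (cur : String) :
    pvScheduleB (PySem.Dict.mk ([] : List (String × String))) subjects cur = [("End", cur)] := by
  induction subjects generalizing cur with
  | nil => rfl
  | cons s rest ih =>
    have h : (PySem.Dict.mk ([] : List (String × String))).get? s = none := rfl
    simp [pvScheduleB, h, ih]

-- main induction over the days, with a common dict accumulator
theorem pvMain (study_time_per_day : List (String × List (String × String))) (start_time : String)
    (spd : List (String × List String)) (d : PySem.Dict String (List (String × String))) :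
    spd.foldl (fun (timetable : PySem.Dict String (List (String × String))) p =>
      if p.2.isEmpty then timetable
      else
        let fin := p.2.foldl (fun (st : List (String × String) × String) subject =>
          match PySem.Dict.get? (PySem.Dict.mk study_time_per_day) p.1 with
          | some inner =>
            match PySem.Dict.get? (PySem.Dict.mk inner) subject with
            | some study_time => (st.1 ++ [(st.2, subject)], pvAddTime st.2 study_time)
            | none => st
          | none => st) ([], start_time)
        timetable.insert p.1 (fin.1 ++ [("End", fin.2)])) d
    = spd.foldl (fun (d : PySem.Dict String (List (String × String))) p =>
        if p.2.isEmpty then d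
        else d.insert p.1
          (pvScheduleB (PySem.Dict.mk ((PySem.Dict.get? (PySem.Dict.mk study_time_per_day) p.1).getD []))
            p.2 start_time)) d := by
  apply List.foldl_ext
  intro tb p _
  by_cases he : p.2.isEmpty
  · simp [he]
  · simp only [Bool.not_eq_true] at he
    simp only [he, Bool.false_eq_true, if_false]
    cases h : PySem.Dict.get? (PySem.Dict.mk study_time_per_day) p.1 with
    | none =>
      have hA : p.2.foldl (fun (st : List (String × String) × String) _ => st) (([] : List (String × String)), start_time) = ([], start_time) := List.foldl_fixed _
      simp [hA, pvScheduleB_empty]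
    | some inner =>
      simp only [Option.getD_some]
      congr 1
      have hA := pvAside (PySem.Dict.mk inner) p.2 [] start_time
      simpa using hA

-- ===== VERDICT (by name: the statement is the Claim_ definition above) =====
theorem create_timetable_spec : Claim_equal_create_timetable := by
  intro spd stpd start _ _
  unfold Spec_create_timetable create_timetable create_timetable_alt
  rw [pvMain]
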